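-- pv_equiv track=rewrite | github.com/1ce2k/iti0102-2023 | TK/tk2/exam.py | max_duplicate
-- ===== SOURCE A (Python) =====
-- def max_duplicate(nums: list) -> int or None:
--     """
--     Return the largest element which has at least one duplicate.
--
--     If no element has duplicate element (an element with the same value), return None.
--
--     max_duplicate([1, 2, 3]) => None
--     max_duplicate([1, 2, 2]) => 2
--     max_duplicate([1, 2, 2, 1, 1]) => 2
--
--     :param nums: List of integers
--     :return: Maximum element with duplicate. None if no duplicate found.
--     """
--     freq_dict = {}
--     for num in nums:
--         if num in freq_dict:
--             freq_dict[num] += 1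
--         else:
--             freq_dict[num] = 1
--     max_element = None
--
--     for num, freq in freq_dict.items():
--         if freq > 1 and (max_element is None or num > max_element):
--             max_element = num
--     if max_element is not None:
--         return max_element
--     return None
-- ===== SOURCE B (Python) =====
-- def max_duplicate(nums: list) -> int or None:
--     """Largest element with at least one duplicate; sort a copy, scan adjacent pairs."""
--     s = sorted(nums)
--     result = None
--     for prev, cur in zip(s, s[1:]):
--         if prev == cur:
--             result = cur
--     return result
-- ===== Notes on version B (the rewrite author's own statement) =====
-- stated objective: alternative
-- what changed: Replaces the frequency dictionary plus max-scan over dict items by sorting a copy of the list and taking the value of the last adjacent equal pair.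
import Mathlib
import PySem

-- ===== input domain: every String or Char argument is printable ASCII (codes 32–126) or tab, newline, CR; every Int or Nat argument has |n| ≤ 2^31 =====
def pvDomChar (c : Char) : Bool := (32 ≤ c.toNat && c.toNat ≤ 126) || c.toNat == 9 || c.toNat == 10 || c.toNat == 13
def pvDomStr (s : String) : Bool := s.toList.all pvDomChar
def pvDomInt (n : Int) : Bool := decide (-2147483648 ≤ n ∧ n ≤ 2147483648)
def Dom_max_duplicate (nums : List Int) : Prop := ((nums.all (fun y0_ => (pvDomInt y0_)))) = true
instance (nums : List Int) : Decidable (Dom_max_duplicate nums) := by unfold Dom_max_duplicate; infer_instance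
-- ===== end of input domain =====

-- B replaces A's frequency dictionary by sorting a copy and taking the last adjacent equal pair (alternative algorithm, similar cost).

-- ===== PORT A =====
-- one step of A's counting loop: `if num in freq_dict: freq_dict[num] += 1 else: freq_dict[num] = 1`
def aCountStep (d : PySem.Dict Int Int) (num : Int) : PySem.Dict Int Int :=
  if d.contains num then d.insert num (d.getD num 0 + 1) else d.insert num 1

-- one step of A's max loop: `if freq > 1 and (max_element is None or num > max_element): max_element = num`
def aMaxStep (me : Option Int) (p : Int × Int) : Option Int :=
  if 1 < p.2 then
    match me with
    | none => some p.1
    | some m => if m < p.1 then some p.1 else some m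
  else me

def max_duplicate (nums : List Int) : Option Int :=
  let freq := nums.foldl aCountStep (PySem.Dict.mk [])
  let maxElement := freq.items.foldl aMaxStep none
  match maxElement with
  | some m => some m
  | none => none

-- ===== PORT B =====
-- one step of B's loop: `if prev == cur: result = cur`
def bStep (res : Option Int) (p : Int × Int) : Option Int :=
  if p.1 = p.2 then some p.2 else res

def max_duplicate_alt (nums : List Int) : Option Int :=
  let s := PySem.List.sorted nums (fun x => x)
  (s.zip (PySem.List.slice s (some 1) none)).foldl bStep none

-- ===== PRECONDITION & SPEC =====
def Spec_max_duplicate (nums : List Int) (out : Option Int) : Prop := out = max_duplicate_alt nums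
instance (nums : List Int) (out : Option Int) : Decidable (Spec_max_duplicate nums out) := by unfold Spec_max_duplicate; infer_instance

-- ===== CLAIM (what is proved, stated in full; the proofs are below) =====
def Claim_equal_max_duplicate : Prop := ∀ (nums : List Int), Dom_max_duplicate nums → Spec_max_duplicate nums (max_duplicate nums)

-- ===== LEMMAS AND PROOFS =====

-- common characterisation: `o` is the largest value occurring at least twice in `l` (none if there is none)
def IsMaxDup (l : List Int) (o : Option Int) : Prop :=
  match o with
  | none => ∀ x : Int, l.count x ≤ 1
  | some v => 2 ≤ l.count v ∧ ∀ x : Int, 2 ≤ l.count x → x ≤ v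

lemma isMaxDup_unique (l : List Int) (o₁ o₂ : Option Int)
    (h₁ : IsMaxDup l o₁) (h₂ : IsMaxDup l o₂) : o₁ = o₂ := by
  match o₁, o₂ with
  | none, none => rfl
  | none, some v => exact absurd h₂.1 (by have := h₁ v; omega)
  | some v, none => exact absurd h₁.1 (by have := h₂ v; omega)
  | some v, some w =>
    exact congrArg some (le_antisymm (h₂.2 v h₁.1) (h₁.2 w h₂.1))

-- ===== A side =====

lemma aCountStep_eq : aCountStep = fun d x => d.insert x (d.getD x 0 + 1) := by
  funext d x
  by_cases h : d.contains x
  · simp [aCountStep, h]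
  · have h' : d.contains x = false := by simpa using h
    simp [aCountStep, h', PySem.Dict.getD_of_not_contains d 0 h']

lemma freq_items (nums : List Int) :
    (nums.foldl aCountStep (PySem.Dict.mk [])).items
      = (PySem.Set.ofList nums).map (fun k => (k, (nums.count k : Int))) := by
  rw [aCountStep_eq]
  rw [show (PySem.Dict.mk ([] : List (Int × Int))) = PySem.Dict.empty from rfl]
  rw [PySem.Dict.foldl_insert_getD_add_one_eq_counter, PySem.Dict.items_counter]

lemma afold_some (cnt : Int → Int) (ks : List Int) (m : Int) :
    ∃ v, ks.foldl (fun me k => aMaxStep me (k, cnt k)) (some m) = some v ∧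
      m ≤ v ∧ (v = m ∨ (v ∈ ks ∧ 1 < cnt v)) ∧ ∀ k ∈ ks, 1 < cnt k → k ≤ v := by
  induction ks generalizing m with
  | nil => exact ⟨m, rfl, le_refl m, Or.inl rfl, by simp⟩
  | cons k ks ih =>
    by_cases hk : 1 < cnt k
    · by_cases hmk : m < k
      · obtain ⟨v, hv, hle, hor, hall⟩ := ih k
        refine ⟨v, by simpa [aMaxStep, hk, hmk] using hv, by omega, ?_, ?_⟩
        · rcases hor with h | ⟨hm, hc⟩
          · exact Or.inr ⟨by simp [h], by simpa [h] using hk⟩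
          · exact Or.inr ⟨List.mem_cons_of_mem _ hm, hc⟩
        · intro j hj hcj
          rcases List.mem_cons.mp hj with rfl | hj
          · exact hle
          · exact hall j hj hcj
      · obtain ⟨v, hv, hle, hor, hall⟩ := ih m
        refine ⟨v, by simpa [aMaxStep, hk, hmk] using hv, hle, ?_, ?_⟩
        · rcases hor with h | ⟨hm, hc⟩
          · exact Or.inl h
          · exact Or.inr ⟨List.mem_cons_of_mem _ hm, hc⟩
        · intro j hj hcj
          rcases List.mem_cons.mp hj with rfl | hj
          · omega
          · exact hall j hj hcj
    · obtain ⟨v, hv, hle, hor, hall⟩ := ih m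
      refine ⟨v, by simpa [aMaxStep, hk] using hv, hle, ?_, ?_⟩
      · rcases hor with h | ⟨hm, hc⟩
        · exact Or.inl h
        · exact Or.inr ⟨List.mem_cons_of_mem _ hm, hc⟩
      · intro j hj hcj
        rcases List.mem_cons.mp hj with rfl | hj
        · exact absurd hcj hk
        · exact hall j hj hcj

lemma afold_none (cnt : Int → Int) (ks : List Int) :
    (ks.foldl (fun me k => aMaxStep me (k, cnt k)) none = none ∧ ∀ k ∈ ks, ¬ 1 < cnt k) ∨
    (∃ v, ks.foldl (fun me k => aMaxStep me (k, cnt k)) none = some v ∧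
      v ∈ ks ∧ 1 < cnt v ∧ ∀ k ∈ ks, 1 < cnt k → k ≤ v) := by
  induction ks with
  | nil => exact Or.inl ⟨rfl, by simp⟩
  | cons k ks ih =>
    by_cases hk : 1 < cnt k
    · obtain ⟨v, hv, hle, hor, hall⟩ := afold_some cnt ks k
      refine Or.inr ⟨v, by simpa [aMaxStep, hk] using hv, ?_, ?_, ?_⟩
      · rcases hor with h | ⟨hm, _⟩
        · simp [h]
        · exact List.mem_cons_of_mem _ hm
      · rcases hor with h | ⟨_, hc⟩
        · simpa [h] using hk
        · exact hc
      · intro j hj hcj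
        rcases List.mem_cons.mp hj with rfl | hj
        · exact hle
        · exact hall j hj hcj
    · rcases ih with ⟨hnone, hall⟩ | ⟨v, hv, hm, hc, hall⟩
      · refine Or.inl ⟨by simpa [aMaxStep, hk] using hnone, ?_⟩
        intro j hj
        rcases List.mem_cons.mp hj with rfl | hj
        · exact hk
        · exact hall j hj
      · refine Or.inr ⟨v, by simpa [aMaxStep, hk] using hv, List.mem_cons_of_mem _ hm, hc, ?_⟩
        intro j hj hcj
        rcases List.mem_cons.mp hj with rfl | hj
        · exact absurd hcj hk
        · exact hall j hj hcj

lemma max_duplicate_eq (nums : List Int) :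
    max_duplicate nums
      = match ((nums.foldl aCountStep (PySem.Dict.mk [])).items.foldl aMaxStep none) with
        | some m => some m
        | none => none := rfl

lemma a_char (nums : List Int) : IsMaxDup nums (max_duplicate nums) := by
  rw [max_duplicate_eq, freq_items, List.foldl_map]
  rcases afold_none (fun k => (nums.count k : Int)) (PySem.Set.ofList nums) with
    ⟨hnone, hall⟩ | ⟨v, hv, hm, hc, hall⟩
  · simp only [hnone, IsMaxDup]
    intro x
    by_contra hx
    have hx2 : 2 ≤ nums.count x := by omega
    have hmem : x ∈ nums := List.count_pos_iff.mp (by omega)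
    have := hall x ((PySem.Set.mem_ofList nums x).mpr hmem)
    omega
  · simp only [hv, IsMaxDup]
    refine ⟨by exact_mod_cast hc, ?_⟩
    intro x hx
    have hmem : x ∈ nums := List.count_pos_iff.mp (by omega)
    exact hall x ((PySem.Set.mem_ofList nums x).mpr hmem) (by exact_mod_cast hx)

-- ===== B side =====

lemma bfold_shift (l : List (Int × Int)) (acc : Option Int) :
    l.foldl bStep acc = match l.foldl bStep none with
                        | none => acc
                        | some v => some v := by
  induction l generalizing acc with
  | nil => rfl
  | cons p l ih =>
    by_cases h : p.1 = p.2
    · simp only [List.foldl_cons, bStep, h, if_pos]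
      rw [ih (some p.2)]
      cases hfl : List.foldl bStep none l <;> rfl
    · simp only [List.foldl_cons, bStep, h, if_neg, not_false_iff]
      exact ih acc

lemma b_pair_spec : ∀ (s : List Int), s.Pairwise (· ≤ ·) →
    IsMaxDup s ((s.zip s.tail).foldl bStep none) := by
  intro s
  induction s with
  | nil => intro _ x; simp
  | cons a t ih =>
    intro hs
    have ha : ∀ y ∈ t, a ≤ y := (List.pairwise_cons.mp hs).1
    have ht : t.Pairwise (· ≤ ·) := (List.pairwise_cons.mp hs).2
    match t with
    | [] => intro x; by_cases hxa : a = x <;> simp [hxa]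
    | b :: t' =>
      have hzip : ((a :: b :: t').zip (a :: b :: t').tail)
          = (a, b) :: ((b :: t').zip (b :: t').tail) := rfl
      rw [hzip, List.foldl_cons, bfold_shift]
      have ihspec := ih ht
      rcases hrest : ((b :: t').zip (b :: t').tail).foldl bStep none with _ | v
      · -- no adjacent duplicate in the tail: every count in the tail is ≤ 1
        rw [hrest] at ihspec
        by_cases hab : a = b
        · subst hab
          show IsMaxDup (a :: a :: t') (bStep none (a, a))
          simp only [bStep, if_pos]
          refine ⟨by simp, ?_⟩
          intro x hx
          have hcx := ihspec x
          rw [List.count_cons] at hx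
          by_cases hxa : x = a
          · omega
          · rw [if_neg (show ¬((a == x) = true) by simp; exact fun h => hxa h.symm)] at hx
            omega
        · show IsMaxDup (a :: b :: t') (bStep none (a, b))
          simp only [bStep, if_neg hab]
          intro x
          have hcx := ihspec x
          rw [List.count_cons]
          by_cases hxa : x = a
          · subst hxa
            have hnot : x ∉ (b :: t') := by
              intro hmem
              rcases List.mem_cons.mp hmem with rfl | hmem2
              · exact hab rfl
              · have h1 : b ≤ x := (List.pairwise_cons.mp ht).1 x hmem2
                have h2 : x ≤ b := ha b (by simp)
                exact hab (le_antisymm h2 h1)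
            have hz : (b :: t').count x = 0 := List.count_eq_zero.mpr hnot
            simp; omega
          · simp [Ne.symm hxa]; omega
      · -- the tail already has an adjacent duplicate of value v
        rw [hrest] at ihspec
        obtain ⟨hv2, hvmax⟩ := ihspec
        have hvmem : v ∈ (b :: t') := List.count_pos_iff.mp (by omega)
        refine ⟨?_, ?_⟩
        · rw [List.count_cons]; omega
        · intro x hx
          rw [List.count_cons] at hx
          by_cases hxa : x = a
          · subst hxa; exact ha v hvmem
          · rw [if_neg (show ¬((a == x) = true) by simp; exact fun h => hxa h.symm)] at hx
            exact hvmax x (by omega)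

lemma max_duplicate_alt_eq (nums : List Int) :
    max_duplicate_alt nums
      = ((PySem.List.sorted nums (fun x => x)).zip
          (PySem.List.slice (PySem.List.sorted nums (fun x => x)) (some 1) none)).foldl
          bStep none := rfl

lemma b_char (nums : List Int) : IsMaxDup nums (max_duplicate_alt nums) := by
  have hslice : PySem.List.slice (PySem.List.sorted nums (fun x => x)) (some 1) none
      = (PySem.List.sorted nums (fun x => x)).tail := by
    rw [PySem.List.slice_from _ (by norm_num : (0:Int) ≤ 1)]
    exact List.drop_one
  rw [max_duplicate_alt_eq, hslice]
  have hpw : (PySem.List.sorted nums (fun x => x)).Pairwise (· ≤ ·) := by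
    simpa using PySem.List.sorted_pairwise nums (fun x => x)
  have hperm : (PySem.List.sorted nums (fun x => x)).Perm nums :=
    PySem.List.sorted_perm nums (fun x => x) false
  have hspec := b_pair_spec _ hpw
  have hcount : ∀ x : Int, (PySem.List.sorted nums (fun x => x)).count x = nums.count x :=
    fun x => hperm.count_eq x
  rcases h : ((PySem.List.sorted nums (fun x => x)).zip
      (PySem.List.sorted nums (fun x => x)).tail).foldl bStep none with _ | v
  · rw [h] at hspec; intro x; rw [← hcount x]; exact hspec x
  · rw [h] at hspec
    exact ⟨by rw [← hcount v]; exact hspec.1,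
      fun x hx => hspec.2 x (by rw [hcount x]; exact hx)⟩

-- ===== VERDICT (by name: the statement is the Claim_ definition above) =====
theorem max_duplicate_spec : Claim_equal_max_duplicate := by
  intro nums _
  unfold Spec_max_duplicate
  exact isMaxDup_unique nums _ _ (a_char nums) (b_char nums)
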